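-- pv_equiv track=rewrite | github.com/SeunghyunWoo99/algorithm-study-2021 | full_search/mock_test/sujeongKim.py | solution
-- ===== SOURCE A (Python) =====
-- def solution(answers):
--     first = [1,2,3,4,5]
--     second = [2,1,2,3,2,4,2,5]
--     third = [3,3,1,1,2,2,4,4,5,5]
--
--     answer = {1: 0, 2: 0, 3: 0}
--     for index, value in enumerate(answers):
--         answer[1] += 1 if first[index%len(first)] == value else 0
--         answer[2] += 1 if second[index%len(second)] == value else 0
--         answer[3] += 1 if third[index%len(third)] == value else 0
--
--     max = 0
--     winners = []
--     for key, value in answer.items():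
--         if value > max:
--             max = value
--             winners.clear()
--             winners.append(key)
--         elif value == max:
--             winners.append(key)
--
--     return winners
-- ===== SOURCE B (Python) =====
-- def solution(answers):
--     # Histogram approach: one pass bins answers by (position mod 40, value); since
--     # lcm(5, 8, 10) = 40 each pattern is 40-periodic, so every score is a sum of
--     # 40 histogram lookups instead of a per-answer comparison against the pattern.
--     hist = {}
--     for i, a in enumerate(answers):
--         key = (i % 40, a)
--         hist[key] = hist.get(key, 0) + 1
--     patterns = [[1, 2, 3, 4, 5],
--                 [2, 1, 2, 3, 2, 4, 2, 5],
--                 [3, 3, 1, 1, 2, 2, 4, 4, 5, 5]]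
--     scores = [sum(hist.get((r, pat[r % len(pat)]), 0) for r in range(40))
--               for pat in patterns]
--     best = max(scores)
--     return [k + 1 for k, s in enumerate(scores) if s == best]
-- ===== Notes on version B (the rewrite author's own statement) =====
-- stated objective: alternative
-- what changed: Instead of comparing each answer against all three patterns in one interleaved dict-updating pass, B bins the answers once into a histogram keyed by (index mod 40, value) (40 = lcm of the pattern lengths) and reads each pattern's score off 40 histogram lookups; winners come from max(scores) plus a filter instead of A's manual max-tracking clear/append loop.
import Mathlib
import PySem

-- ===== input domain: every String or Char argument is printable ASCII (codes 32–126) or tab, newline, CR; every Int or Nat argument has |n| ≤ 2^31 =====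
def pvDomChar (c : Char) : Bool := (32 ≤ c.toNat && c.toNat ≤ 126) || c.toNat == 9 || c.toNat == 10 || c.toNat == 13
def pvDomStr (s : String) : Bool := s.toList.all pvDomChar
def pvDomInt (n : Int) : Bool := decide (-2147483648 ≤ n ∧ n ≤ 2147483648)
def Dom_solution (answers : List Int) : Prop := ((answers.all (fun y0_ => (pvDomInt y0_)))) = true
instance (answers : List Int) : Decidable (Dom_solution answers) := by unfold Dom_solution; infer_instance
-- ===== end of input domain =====

-- B bins answers once into a 40-bucket histogram keyed by (index mod 40, value) — 40 = lcm of the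
-- pattern lengths — and reads each pattern's score off 40 histogram lookups instead of comparing
-- every answer against every pattern; winners are then max(scores) plus a filter (alternative).

-- ===== PORT A =====
def solution (answers : List Int) : List Int :=
  let first : List Int := [1,2,3,4,5]
  let second : List Int := [2,1,2,3,2,4,2,5]
  let third : List Int := [3,3,1,1,2,2,4,4,5,5]
  let answer : PySem.Dict Int Int := PySem.Dict.ofList [(1,0),(2,0),(3,0)]
  let answer := (PySem.List.enumerate answers).foldl (fun d iv =>
      (((d.modify 1 0 (fun x => x + (if PySem.List.pyGetD first (PySem.Int.mod iv.1 (first.length : Int)) 0 == iv.2 then 1 else 0))).modify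
            2 0 (fun x => x + (if PySem.List.pyGetD second (PySem.Int.mod iv.1 (second.length : Int)) 0 == iv.2 then 1 else 0))).modify
            3 0 (fun x => x + (if PySem.List.pyGetD third (PySem.Int.mod iv.1 (third.length : Int)) 0 == iv.2 then 1 else 0)))) answer
  let r := answer.items.foldl (fun (st : Int × List Int) kv =>
      if kv.2 > st.1 then (kv.2, [kv.1])
      else if kv.2 == st.1 then (st.1, st.2 ++ [kv.1])
      else st) (0, ([] : List Int))
  r.2

-- ===== PORT B =====
-- hist: one pass, hist[(i % 40, a)] = hist.get((i % 40, a), 0) + 1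
def pvBHist (answers : List Int) : PySem.Dict (Int × Int) Int :=
  (PySem.List.enumerate answers).foldl
    (fun h ia =>
      h.insert (PySem.Int.mod ia.1 40, ia.2) (h.getD (PySem.Int.mod ia.1 40, ia.2) 0 + 1))
    (PySem.Dict.mk [])

-- sum(hist.get((r, pat[r % len(pat)]), 0) for r in range(40))
def pvBScore (hist : PySem.Dict (Int × Int) Int) (pat : List Int) : Int :=
  ((PySem.List.pyRange 0 40 1).map
    (fun r => hist.getD (r, PySem.List.pyGetD pat (PySem.Int.mod r (pat.length : Int)) 0) 0)).sum

def solution_alt (answers : List Int) : List Int :=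
  let hist := pvBHist answers
  let patterns : List (List Int) := [[1,2,3,4,5],[2,1,2,3,2,4,2,5],[3,3,1,1,2,2,4,4,5,5]]
  let scores := patterns.map (fun pat => pvBScore hist pat)
  let best := (PySem.List.max? scores id).getD 0
  (PySem.List.enumerate scores).filterMap (fun ks => if ks.2 == best then some (ks.1 + 1) else none)

-- ===== PRECONDITION & SPEC =====
def Spec_solution (answers : List Int) (out : List Int) : Prop := out = solution_alt answers
instance (answers : List Int) (out : List Int) : Decidable (Spec_solution answers out) := by unfold Spec_solution; infer_instance

-- ===== CLAIM (what is proved, stated in full; the proofs are below) =====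
def Claim_equal_solution : Prop := ∀ (answers : List Int), Dom_solution answers → Spec_solution answers (solution answers)

-- ===== LEMMAS AND PROOFS =====

-- A's interleaved fold over the three-key dict splits into three independent scalar folds.
theorem pv_fold3 (first second third : List Int) (l : List (Int × Int)) (a b c : Int) :
    l.foldl (fun d iv =>
      (((d.modify 1 0 (fun x => x + (if PySem.List.pyGetD first (PySem.Int.mod iv.1 (first.length : Int)) 0 == iv.2 then 1 else 0))).modify
            2 0 (fun x => x + (if PySem.List.pyGetD second (PySem.Int.mod iv.1 (second.length : Int)) 0 == iv.2 then 1 else 0))).modify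
            3 0 (fun x => x + (if PySem.List.pyGetD third (PySem.Int.mod iv.1 (third.length : Int)) 0 == iv.2 then 1 else 0)))) (PySem.Dict.mk ([(1,a),(2,b),(3,c)] : List (Int × Int)))
    = PySem.Dict.mk ([(1, l.foldl (fun x iv => x + (if PySem.List.pyGetD first (PySem.Int.mod iv.1 (first.length : Int)) 0 == iv.2 then 1 else 0)) a),
                     (2, l.foldl (fun x iv => x + (if PySem.List.pyGetD second (PySem.Int.mod iv.1 (second.length : Int)) 0 == iv.2 then 1 else 0)) b),
                     (3, l.foldl (fun x iv => x + (if PySem.List.pyGetD third (PySem.Int.mod iv.1 (third.length : Int)) 0 == iv.2 then 1 else 0)) c)] : List (Int × Int)) := by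
  induction l generalizing a b c with
  | nil => rfl
  | cons hd tl ih =>
      simp only [List.foldl_cons]
      rw [show ((((PySem.Dict.mk ([(1,a),(2,b),(3,c)] : List (Int × Int))).modify 1 0 _).modify 2 0 _).modify 3 0 _) =
        PySem.Dict.mk ([(1, a + (if PySem.List.pyGetD first (PySem.Int.mod hd.1 (first.length : Int)) 0 == hd.2 then 1 else 0)),
                       (2, b + (if PySem.List.pyGetD second (PySem.Int.mod hd.1 (second.length : Int)) 0 == hd.2 then 1 else 0)),
                       (3, c + (if PySem.List.pyGetD third (PySem.Int.mod hd.1 (third.length : Int)) 0 == hd.2 then 1 else 0))] : List (Int × Int)) from by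
          simp [PySem.Dict.modify, PySem.Dict.insert, PySem.Dict.getD, PySem.Dict.get?, PySem.Dict.contains]]
      exact ih _ _ _

-- A's counting fold never decreases its accumulator.
theorem pv_count_mono (pat : List Int) (l : List (Int × Int)) (a : Int) :
    a ≤ l.foldl (fun x iv => x + (if PySem.List.pyGetD pat (PySem.Int.mod iv.1 (pat.length : Int)) 0 == iv.2 then 1 else 0)) a := by
  induction l generalizing a with
  | nil => exact le_refl a
  | cons hd tl ih =>
      simp only [List.foldl_cons]
      refine le_trans ?_ (ih _)
      split_ifs <;> omega

-- Every index produced by enumerate (from start s) is ≥ s.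
theorem pv_enum_ge (xs : List Int) (s : Int) :
    ∀ p ∈ PySem.List.enumerate xs s, s ≤ p.1 := by
  induction xs generalizing s with
  | nil => simp [PySem.List.enumerate_nil]
  | cons hd tl ih =>
      intro p hp
      rw [PySem.List.enumerate_cons] at hp
      rcases List.mem_cons.mp hp with h | h
      · subst h; exact le_refl s
      · have := ih (s+1) p h; omega

-- The score of the empty histogram is 0.
theorem pv_score_empty (pat : List Int) : pvBScore (PySem.Dict.mk []) pat = 0 := by
  unfold pvBScore
  refine List.sum_eq_zero ?_
  intro x hx
  obtain ⟨r, -, rfl⟩ := List.mem_map.mp hx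
  rfl

-- Incrementing the histogram bucket of answer a at index i (i ≥ 0) raises the score of a
-- 40-periodic pattern by exactly its match indicator at index i.
theorem pv_score_bump (pat : List Int)
    (hmod : ∀ i : Int, 0 ≤ i → PySem.Int.mod (PySem.Int.mod i 40) (pat.length : Int) = PySem.Int.mod i (pat.length : Int))
    (h : PySem.Dict (Int × Int) Int) (i a : Int) (hi : 0 ≤ i) :
    pvBScore (h.insert (PySem.Int.mod i 40, a) (h.getD (PySem.Int.mod i 40, a) 0 + 1)) pat
      = pvBScore h pat + (if PySem.List.pyGetD pat (PySem.Int.mod i (pat.length : Int)) 0 == a then 1 else 0) := by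
  have hq0 : 0 ≤ PySem.Int.mod i 40 := PySem.Int.mod_nonneg i (by omega)
  have hq40 : PySem.Int.mod i 40 < 40 := PySem.Int.mod_lt i (by omega)
  set q : Int := PySem.Int.mod i 40 with hqdef
  unfold pvBScore
  rw [PySem.List.pyRange_one_append 0 q 40 hq0 (le_of_lt hq40),
      PySem.List.pyRange_one_cons hq40]
  simp only [List.map_append, List.map_cons, List.sum_append, List.sum_cons]
  have hne : ∀ r : Int, r ≠ q → ∀ v : Int,
      (h.insert (q, a) (h.getD (q, a) 0 + 1)).getD (r, v) 0 = h.getD (r, v) 0 := by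
    intro r hr v
    rw [PySem.Dict.getD_insert]
    rw [if_neg]; intro hEq
    exact hr (congrArg Prod.fst hEq)
  rw [List.map_congr_left (fun r hr => hne r (by have := (PySem.List.mem_pyRange_one.mp hr).2; omega) _),
      List.map_congr_left (fun r hr => hne r (by have := (PySem.List.mem_pyRange_one.mp hr).1; omega) _)]
  rw [PySem.Dict.getD_insert]
  rw [hmod i hi]
  by_cases hv : PySem.List.pyGetD pat (PySem.Int.mod i (pat.length : Int)) 0 = a
  · rw [hv, if_pos rfl, if_pos (by simp)]
    ring
  · rw [if_neg (by intro hEq; exact hv (congrArg Prod.snd hEq)), if_neg (by simp [hv])]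
    ring
-- Building the histogram over a list of (index, value) pairs folds the match indicators
-- into the score, one by one.
theorem pv_hist_fold (pat : List Int)
    (hmod : ∀ i : Int, 0 ≤ i → PySem.Int.mod (PySem.Int.mod i 40) (pat.length : Int) = PySem.Int.mod i (pat.length : Int))
    (l : List (Int × Int)) (h : PySem.Dict (Int × Int) Int) (hpos : ∀ p ∈ l, 0 ≤ p.1) :
    pvBScore (l.foldl (fun h ia =>
        h.insert (PySem.Int.mod ia.1 40, ia.2) (h.getD (PySem.Int.mod ia.1 40, ia.2) 0 + 1)) h) pat
    = l.foldl (fun x iv => x + (if PySem.List.pyGetD pat (PySem.Int.mod iv.1 (pat.length : Int)) 0 == iv.2 then 1 else 0)) (pvBScore h pat) := by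
  induction l generalizing h with
  | nil => rfl
  | cons hd tl ih =>
      simp only [List.foldl_cons]
      rw [ih _ (fun p hp => hpos p (List.mem_cons_of_mem _ hp)),
          pv_score_bump pat hmod h hd.1 hd.2 (hpos hd (List.mem_cons_self))]

-- A's max-tracking loop over the three (key, score) items equals B's max + filter,
-- given the three scores are nonnegative (they are counts).
theorem pv_max3 (a b c : Int) :
    PySem.List.max? ([a,b,c]) id = some (if (if a < b then b else a) < c then c else (if a < b then b else a)) := by
  simp only [PySem.List.max?, List.foldl_cons, List.foldl_nil, id]
  split_ifs <;> simp_all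

set_option maxHeartbeats 1000000 in
theorem pv_winners (a b c : Int) (ha : 0 ≤ a) (hb : 0 ≤ b) (hc : 0 ≤ c) :
    (([(1,a),(2,b),(3,c)] : List (Int × Int)).foldl (fun (st : Int × List Int) kv =>
      if kv.2 > st.1 then (kv.2, [kv.1])
      else if kv.2 == st.1 then (st.1, st.2 ++ [kv.1])
      else st) (0, ([] : List Int))).2
    = (PySem.List.enumerate [a,b,c]).filterMap
        (fun ks => if ks.2 == (PySem.List.max? [a,b,c] id).getD 0 then some (ks.1 + 1) else none) := by
  rw [pv_max3]
  simp only [List.foldl_cons, List.foldl_nil,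
    PySem.List.enumerate_cons, PySem.List.enumerate_nil,
    List.filterMap_cons, List.filterMap_nil, beq_iff_eq, gt_iff_lt, Option.getD_some]
  split_ifs <;> ((try simp) <;> omega)

-- ===== VERDICT (by name: the statement is the Claim_ definition above) =====
theorem solution_spec : Claim_equal_solution := by
  intro answers _
  unfold Spec_solution solution solution_alt pvBHist
  simp only [List.map]
  have hm : ∀ (x b : Int), 0 < b → PySem.Int.mod x b = x % b := fun x b hb =>
    PySem.Int.mod_eq_emod_of_pos hb
  have e5 : (([1,2,3,4,5] : List Int).length : Int) = 5 := by norm_num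
  have e8 : (([2,1,2,3,2,4,2,5] : List Int).length : Int) = 8 := by norm_num
  have e10 : (([3,3,1,1,2,2,4,4,5,5] : List Int).length : Int) = 10 := by norm_num
  have h5 : ∀ i : Int, 0 ≤ i → PySem.Int.mod (PySem.Int.mod i 40) ((([1,2,3,4,5] : List Int).length : Int)) = PySem.Int.mod i ((([1,2,3,4,5] : List Int).length : Int)) := by
    intro i _
    rw [e5, hm i 40 (by omega), hm (i % 40) 5 (by omega), hm i 5 (by omega)]; omega
  have h8 : ∀ i : Int, 0 ≤ i → PySem.Int.mod (PySem.Int.mod i 40) ((([2,1,2,3,2,4,2,5] : List Int).length : Int)) = PySem.Int.mod i ((([2,1,2,3,2,4,2,5] : List Int).length : Int)) := by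
    intro i _
    rw [e8, hm i 40 (by omega), hm (i % 40) 8 (by omega), hm i 8 (by omega)]; omega
  have h10 : ∀ i : Int, 0 ≤ i → PySem.Int.mod (PySem.Int.mod i 40) ((([3,3,1,1,2,2,4,4,5,5] : List Int).length : Int)) = PySem.Int.mod i ((([3,3,1,1,2,2,4,4,5,5] : List Int).length : Int)) := by
    intro i _
    rw [e10, hm i 40 (by omega), hm (i % 40) 10 (by omega), hm i 10 (by omega)]; omega
  have hpos : ∀ p ∈ PySem.List.enumerate answers, (0:Int) ≤ p.1 := pv_enum_ge answers 0
  have hs1 := (pv_hist_fold _ h5 (PySem.List.enumerate answers) (PySem.Dict.mk []) hpos).trans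
    (by rw [pv_score_empty])
  have hs2 := (pv_hist_fold _ h8 (PySem.List.enumerate answers) (PySem.Dict.mk []) hpos).trans
    (by rw [pv_score_empty])
  have hs3 := (pv_hist_fold _ h10 (PySem.List.enumerate answers) (PySem.Dict.mk []) hpos).trans
    (by rw [pv_score_empty])
  simp only [hs1, hs2, hs3]
  rw [show PySem.Dict.ofList [((1:Int),(0:Int)),(2,0),(3,0)] = PySem.Dict.mk [(1,0),(2,0),(3,0)] from rfl]
  rw [pv_fold3 [1,2,3,4,5] [2,1,2,3,2,4,2,5] [3,3,1,1,2,2,4,4,5,5] (PySem.List.enumerate answers) 0 0 0]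
  exact pv_winners _ _ _ (pv_count_mono _ _ 0) (pv_count_mono _ _ 0) (pv_count_mono _ _ 0)
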